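-- pv_equiv track=rewrite | github.com/zubairAbubakar/consulting-gpt-backend | app/services/analysis_status_service.py | _calculate_overall_status
-- ===== SOURCE A (Python) =====
-- from typing import List, Dict, Any, Optional
--
-- def _calculate_overall_status(statuses: List[str]) -> str:
--     """
--     Calculate the overall status based on component statuses
--     """
--     if not statuses:
--         return "pending"
--
--     if any(s == "error" for s in statuses):
--         return "error"
--
--     if all(s == "complete" for s in statuses):
--         return "complete"
--
--     if any(s == "processing" for s in statuses):
--         return "processing"
--
--     return "pending"
-- ===== SOURCE B (Python) =====
-- def _calculate_overall_status(statuses):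
--     # Lattice/rank formulation: each status maps to a severity rank
--     # (complete=0 < pending/other=1 < processing=2 < error=3); the overall
--     # status is simply the NAME of the maximum rank present.
--     _RANK = {"complete": 0, "processing": 2, "error": 3}
--     _NAME = ["complete", "pending", "processing", "error"]
--     if not statuses:
--         return "pending"
--     return _NAME[max(_RANK.get(s, 1) for s in statuses)]
-- ===== Notes on version B (the rewrite author's own statement) =====
-- stated objective: alternative
-- what changed: Replaced A's priority-ordered any/all scans with a lattice formulation: each status is mapped to a severity rank (complete=0 < pending=1 < processing=2 < error=3) and the result is simply the name of the maximum rank present.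
import Mathlib
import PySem

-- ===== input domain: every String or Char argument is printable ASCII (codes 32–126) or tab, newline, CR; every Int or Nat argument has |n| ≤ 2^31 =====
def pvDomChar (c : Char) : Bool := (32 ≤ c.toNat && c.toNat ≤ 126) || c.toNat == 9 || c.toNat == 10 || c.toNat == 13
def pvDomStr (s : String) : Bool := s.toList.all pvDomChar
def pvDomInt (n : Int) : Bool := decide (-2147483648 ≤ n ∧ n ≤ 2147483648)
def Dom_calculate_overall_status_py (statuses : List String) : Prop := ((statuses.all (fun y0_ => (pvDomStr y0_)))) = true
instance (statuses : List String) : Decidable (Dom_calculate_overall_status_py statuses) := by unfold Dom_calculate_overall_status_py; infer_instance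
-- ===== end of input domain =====

-- B replaces A's priority-ordered any/all scans with a severity lattice: map each
-- status to a rank (complete=0 < pending=1 < processing=2 < error=3) and return
-- the name of the maximum rank present; same O(n) cost, different algorithm.


-- ===== PORT A =====
-- Port of A: empty guard, then four separate any/all scans, in A's branch order.
def calculate_overall_status_py (statuses : List String) : String :=
  if statuses.isEmpty then "pending"
  else if statuses.any (fun s => s == "error") then "error"
  else if statuses.all (fun s => s == "complete") then "complete"
  else if statuses.any (fun s => s == "processing") then "processing"
  else "pending"

-- ===== PORT B =====
-- _RANK.get(s, 1): severity rank of one status.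
def pvRank (s : String) : Nat :=
  if s == "complete" then 0 else if s == "processing" then 2 else if s == "error" then 3 else 1
-- _NAME[r]; r is always 0..3 (a pvRank), so plain in-range indexing (getD is exact here).
def pvName (r : Nat) : String := ["complete", "pending", "processing", "error"].getD r ""
-- Port of B: empty guard, then Python's max over the mapped ranks (max of a
-- nonempty iterable = fold of binary max over the rest starting from the first).
def calculate_overall_status_py_alt (statuses : List String) : String :=
  match statuses with
  | [] => "pending"
  | s :: rest => pvName ((rest.map pvRank).foldl max (pvRank s))

-- ===== PRECONDITION & SPEC =====
def Spec_calculate_overall_status_py (statuses : List String) (out : String) : Prop := out = calculate_overall_status_py_alt statuses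
instance (statuses : List String) (out : String) : Decidable (Spec_calculate_overall_status_py statuses out) := by unfold Spec_calculate_overall_status_py; infer_instance

-- ===== CLAIM (what is proved, stated in full; the proofs are below) =====
def Claim_equal_calculate_overall_status_py : Prop := ∀ (statuses : List String), Dom_calculate_overall_status_py statuses → Spec_calculate_overall_status_py statuses (calculate_overall_status_py statuses)

-- ===== LEMMAS AND PROOFS =====

-- The fold of max over the mapped ranks equals A's scans, packaged as one number.
theorem pv_fold_max_char (l : List String) (i : Nat) (hi : i ≤ 3) :
    (l.map pvRank).foldl max i =
      if i = 3 ∨ l.any (fun s => s == "error") then 3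
      else if i = 2 ∨ l.any (fun s => s == "processing") then 2
      else if i = 0 ∧ l.all (fun s => s == "complete") then 0
      else 1 := by
  induction l generalizing i with
  | nil =>
      simp only [List.map_nil, List.foldl_nil, List.any_nil, List.all_nil,
        Bool.false_eq_true, or_false, and_true]
      split_ifs <;> omega
  | cons h t ih =>
      have hr : pvRank h ≤ 3 := by unfold pvRank; split_ifs <;> omega
      simp only [List.map_cons, List.foldl_cons, List.any_cons, List.all_cons,
        ih (max i (pvRank h)) (by omega)]
      by_cases hc : h = "complete" <;> by_cases hp : h = "processing" <;>
        by_cases he : h = "error" <;>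
        by_cases te : t.any (fun s => s == "error") = true <;>
        by_cases tp : t.any (fun s => s == "processing") = true <;>
        by_cases ta : t.all (fun s => s == "complete") = true <;>
        simp_all [pvRank] <;>
        first
          | omega
          | (split_ifs <;> omega)

theorem calculate_overall_status_py_spec : Claim_equal_calculate_overall_status_py := by
  intro statuses _
  unfold Spec_calculate_overall_status_py
  cases statuses with
  | nil => rfl
  | cons s rest =>
      have hr : pvRank s ≤ 3 := by unfold pvRank; split_ifs <;> omega
      simp only [calculate_overall_status_py, calculate_overall_status_py_alt,
        List.isEmpty_cons, List.any_cons, List.all_cons]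
      rw [pv_fold_max_char _ _ hr]
      by_cases hc : s = "complete" <;> by_cases hp : s = "processing" <;>
        by_cases he : s = "error" <;>
        by_cases te : rest.any (fun s => s == "error") = true <;>
        by_cases tp : rest.any (fun s => s == "processing") = true <;>
        by_cases ta : rest.all (fun s => s == "complete") = true <;>
        simp_all [pvRank, pvName] <;>
        first
          | rfl
          | (split_ifs <;> simp_all)
          | (exact absurd (ta _ tp) (by simp))
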